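-- pv_equiv track=rewrite | github.com/yanickdi/sugimoto_course | BSP27_DICKBAUER_MOSER_PERNER.py | check_field_status
-- ===== SOURCE A (Python) =====
-- ALIVE = 1
--
-- DEAD = -1
--
-- INFECTED = 0
--
-- def check_field_status(field):
--     """ counts nr_alive, nr_infected and nr_dead units and returns a dictionary containing these values"""
--     nr_alive, nr_infected, nr_dead = 0, 0, 0
--     for x, y in x_y_combinations(field):
--         status = field[x][y]['status']
--         if   status == ALIVE: nr_alive += 1
--         elif status == DEAD : nr_dead += 1
--         elif status == INFECTED: nr_infected += 1
--     return {'nr_alive' : nr_alive, 'nr_infected' : nr_infected, 'nr_dead' : nr_dead}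
--
-- def x_y_combinations(field):
--     """ Returns an iterater object that yields each (x,y) combination of the field"""
--     for x in range(len(field)):
--         for y in range(len(field[x])):
--             yield x,y
-- ===== SOURCE B (Python) =====
-- ALIVE = 1
--
-- DEAD = -1
--
-- INFECTED = 0
--
-- def check_field_status(field):
--     """ counts nr_alive, nr_infected and nr_dead units and returns a dictionary containing these values"""
--     cells = [cell for row in field for cell in row]
--     nr_alive = sum(1 for cell in cells if cell['status'] == ALIVE)
--     nr_infected = sum(1 for cell in cells if cell['status'] == INFECTED)
--     nr_dead = sum(1 for cell in cells if cell['status'] == DEAD)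
--     return {'nr_alive': nr_alive, 'nr_infected': nr_infected, 'nr_dead': nr_dead}
-- ===== Notes on version B (the rewrite author's own statement) =====
-- stated objective: simpler
-- what changed: Replaces the index-generator driven single accumulator pass (x_y_combinations yielding (x,y) pairs, branch-dispatch into three counters) with a flattened cell list and three independent per-status counting passes.
import Mathlib
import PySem

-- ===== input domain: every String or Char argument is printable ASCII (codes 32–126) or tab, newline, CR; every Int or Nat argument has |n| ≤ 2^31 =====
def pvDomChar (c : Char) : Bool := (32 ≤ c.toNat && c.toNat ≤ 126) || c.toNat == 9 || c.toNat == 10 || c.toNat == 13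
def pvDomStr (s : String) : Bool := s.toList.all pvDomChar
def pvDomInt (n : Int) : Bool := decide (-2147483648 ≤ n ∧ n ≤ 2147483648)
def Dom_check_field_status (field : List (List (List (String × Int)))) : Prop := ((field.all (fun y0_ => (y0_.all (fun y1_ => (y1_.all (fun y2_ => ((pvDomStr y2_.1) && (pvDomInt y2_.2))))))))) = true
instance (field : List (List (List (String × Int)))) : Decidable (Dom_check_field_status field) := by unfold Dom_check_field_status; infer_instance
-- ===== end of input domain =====

-- B replaces A's single generator-driven branch-dispatch pass with a flattened cell
-- list and three independent per-status counting passes (objective: simpler).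

-- ===== PORT A =====
-- cell['status'] : first-match association-list lookup; none = KeyError (excluded by Pre_)
def pvStatus? (cell : List (String × Int)) : Option Int :=
  (cell.find? (fun p => p.1 == "status")).map (·.2)

-- transliteration of the generator x_y_combinations(field)
def x_y_combinations (field : List (List (List (String × Int)))) : List (Int × Int) :=
  (PySem.List.pyRange 0 (field.length : Int) 1).flatMap (fun x =>
    (PySem.List.pyRange 0 ((PySem.List.pyGetD field x []).length : Int) 1).map (fun y => (x, y)))

-- step of A's loop body on the accumulator (nr_alive, nr_infected, nr_dead)
def pvStepA (acc : Int × Int × Int) (cell : List (String × Int)) : Int × Int × Int :=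
  match pvStatus? cell with
  | none => acc          -- KeyError in Python; unreachable under Pre_
  | some status =>
    if status = 1 then (acc.1 + 1, acc.2.1, acc.2.2)
    else if status = -1 then (acc.1, acc.2.1, acc.2.2 + 1)
    else if status = 0 then (acc.1, acc.2.1 + 1, acc.2.2)
    else acc

def check_field_status (field : List (List (List (String × Int)))) : List (String × Int) :=
  let s := (x_y_combinations field).foldl
    (fun acc xy => pvStepA acc (PySem.List.pyGetD (PySem.List.pyGetD field xy.1 []) xy.2 []))
    (0, 0, 0)
  [("nr_alive", s.1), ("nr_infected", s.2.1), ("nr_dead", s.2.2)]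

-- ===== PORT B =====  (shares the cell['status'] lookup primitive pvStatus? with port A)
def check_field_status_alt (field : List (List (List (String × Int)))) : List (String × Int) :=
  let cells := field.flatMap (fun row => row)
  let nr_alive : Int := (cells.countP (fun c => pvStatus? c == some 1) : Int)
  let nr_infected : Int := (cells.countP (fun c => pvStatus? c == some 0) : Int)
  let nr_dead : Int := (cells.countP (fun c => pvStatus? c == some (-1)) : Int)
  [("nr_alive", nr_alive), ("nr_infected", nr_infected), ("nr_dead", nr_dead)]

-- ===== PRECONDITION & SPEC =====
-- Pre_ excludes only inputs where A raises KeyError: some cell has no "status" key.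
def Pre_check_field_status (field : List (List (List (String × Int)))) : Prop :=
  (field.all (fun row => row.all (fun cell => cell.any (fun p => p.1 == "status")))) = true
instance (field : List (List (List (String × Int)))) : Decidable (Pre_check_field_status field) := by unfold Pre_check_field_status; infer_instance

def pvWitness_check_field_status : (List (List (List (String × Int)))) :=
  [[[("status", 1)], [("status", 0)]], [[("status", -1)], [("status", 7)]]]

def Spec_check_field_status (field : List (List (List (String × Int)))) (out : List (String × Int)) : Prop := out = check_field_status_alt field
instance (field : List (List (List (String × Int)))) (out : List (String × Int)) : Decidable (Spec_check_field_status field out) := by unfold Spec_check_field_status; infer_instance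

-- ===== CLAIM (what is proved, stated in full; the proofs are below) =====
def Claim_equal_check_field_status : Prop := ∀ (field : List (List (List (String × Int)))), Dom_check_field_status field → Pre_check_field_status field → Spec_check_field_status field (check_field_status field)

-- ===== LEMMAS AND PROOFS =====

-- A's fold over the (x,y) index pairs is the fold of pvStepA over the flattened cells
theorem foldA_flatten (field : List (List (List (String × Int)))) (init : Int × Int × Int) :
    (x_y_combinations field).foldl
      (fun acc xy => pvStepA acc (PySem.List.pyGetD (PySem.List.pyGetD field xy.1 []) xy.2 []))
      init
    = (field.flatMap (fun row => row)).foldl pvStepA init := by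
  unfold x_y_combinations
  rw [List.foldl_flatMap]
  simp only [List.foldl_map]
  rw [PySem.List.foldl_pyRange_zero_pyGetD' field ([] : List (List (String × Int)))
      (fun acc row => (PySem.List.pyRange 0 ((row : List (List (String × Int))).length : Int) 1).foldl
        (fun a y => pvStepA a (PySem.List.pyGetD row y [])) acc) init]
  · induction field generalizing init with
    | nil => rfl
    | cons r t ih =>
      simp only [List.flatMap_cons, List.foldl_append, List.foldl_cons]
      rw [← ih]
      congr 1
      exact PySem.List.foldl_pyRange_zero_pyGetD' r ([] : List (String × Int)) pvStepA init

-- folding pvStepA counts the three statuses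
theorem foldA_counts (l : List (List (String × Int))) (a i d : Int) :
    l.foldl pvStepA (a, i, d)
    = (a + (l.countP (fun c => pvStatus? c == some 1) : Int),
       i + (l.countP (fun c => pvStatus? c == some 0) : Int),
       d + (l.countP (fun c => pvStatus? c == some (-1)) : Int)) := by
  induction l generalizing a i d with
  | nil => simp
  | cons c t ih =>
    simp only [List.foldl_cons, List.countP_cons]
    rw [ih]
    cases h : pvStatus? c with
    | none => simp [pvStepA, h]
    | some st =>
      simp only [pvStepA, h]
      by_cases h1 : st = 1
      · simp [h1]; omega
      · by_cases h2 : st = -1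
        · simp [h2]; omega
        · by_cases h3 : st = 0
          · simp [h3]; omega
          · simp [h1, h2, h3]

-- ===== VERDICT (by name: the statement is the Claim_ definition above) =====
theorem check_field_status_spec : Claim_equal_check_field_status := by
  intro field _ _
  unfold Spec_check_field_status check_field_status check_field_status_alt
  rw [foldA_flatten, foldA_counts]
  simp
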